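-- pv_equiv track=rewrite | github.com/iEldesouky/timetable-csp-generator | csp_solver.py | create_section_groups
-- ===== SOURCE A (Python) =====
-- def create_section_groups(sections, session_type='Lecture'):
--     """
--     Group sections based on session type:
--     - TUT: Individual sections (1 per group)
--     - Lab: Pairs (2 per group)
--     - Lecture: 3-4 per group based on total count
--     """
--     if session_type == 'TUT':
--         # TUT sessions are individual - each section gets its own timeslot
--         group_size = 1
--     elif session_type == 'Lab':
--         # Labs are in pairs
--         group_size = 2
--     else:
--         # Lectures: use 4 if even number of sections, 3 if odd
--         group_size = 4 if len(sections) % 2 == 0 else 3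
--
--     # Create groups of the specified size
--     groups = []
--     for i in range(0, len(sections), group_size):
--         group = sections[i:i+group_size]
--         groups.append(group)
--
--     return groups
-- ===== SOURCE B (Python) =====
-- def create_section_groups(sections, session_type='Lecture'):
--     if session_type == 'TUT':
--         group_size = 1
--     elif session_type == 'Lab':
--         group_size = 2
--     else:
--         group_size = 4 if len(sections) % 2 == 0 else 3
--     groups = []
--     buf = []
--     for s in sections:
--         buf.append(s)
--         if len(buf) == group_size:
--             groups.append(buf)
--             buf = []
--     if buf:
--         groups.append(buf)
--     return groups
-- ===== Notes on version B (the rewrite author's own statement) =====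
-- stated objective: alternative
-- what changed: Replaces index-stepped slicing over range(0, len, group_size) with a single element-wise pass that fills a running buffer and flushes it each time it reaches group_size (plus a final partial flush).
import Mathlib
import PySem

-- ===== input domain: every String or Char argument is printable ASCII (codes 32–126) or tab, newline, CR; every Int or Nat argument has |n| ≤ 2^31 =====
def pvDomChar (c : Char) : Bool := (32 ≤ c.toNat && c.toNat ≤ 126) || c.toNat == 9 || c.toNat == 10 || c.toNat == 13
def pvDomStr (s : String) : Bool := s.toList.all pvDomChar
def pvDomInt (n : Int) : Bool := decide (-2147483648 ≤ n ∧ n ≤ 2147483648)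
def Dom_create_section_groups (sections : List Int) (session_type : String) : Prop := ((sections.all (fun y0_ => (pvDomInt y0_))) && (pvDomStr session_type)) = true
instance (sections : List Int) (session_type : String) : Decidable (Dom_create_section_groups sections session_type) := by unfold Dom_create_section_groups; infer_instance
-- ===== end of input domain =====

-- B replaces A's index-stepped slicing by a single element-wise pass with a running buffer
-- flushed at group_size (alternative decomposition; same O(n) cost). Return values agree everywhere.

-- ===== PORT A =====
-- literal port of A: group_size by the same branch chain, then a loop over
-- range(0, len(sections), group_size) appending the slice sections[i:i+group_size].
def create_section_groups (sections : List Int) (session_type : String) : List (List Int) :=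
  let group_size : Int :=
    if session_type = "TUT" then 1
    else if session_type = "Lab" then 2
    else if PySem.Int.mod (sections.length : Int) 2 = 0 then 4 else 3
  (PySem.List.pyRange 0 (sections.length : Int) group_size).foldl
    (fun groups i => groups ++ [PySem.List.slice sections (some i) (some (i + group_size))]) []

-- ===== PORT B =====
-- literal port of B: same group_size guard, then an element-wise loop keeping a buffer,
-- flushing it into groups each time its length reaches group_size; final partial flush.
def csgLoop (gs : Int) (groups : List (List Int)) (buf : List Int) : List Int → List (List Int)
  | [] => if buf.isEmpty then groups else groups ++ [buf]
  | x :: xs =>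
    let buf' := buf ++ [x]
    if (buf'.length : Int) = gs then csgLoop gs (groups ++ [buf']) [] xs
    else csgLoop gs groups buf' xs

def create_section_groups_alt (sections : List Int) (session_type : String) : List (List Int) :=
  let group_size : Int :=
    if session_type = "TUT" then 1
    else if session_type = "Lab" then 2
    else if PySem.Int.mod (sections.length : Int) 2 = 0 then 4 else 3
  csgLoop group_size [] [] sections

-- ===== PRECONDITION & SPEC =====
def Spec_create_section_groups (sections : List Int) (session_type : String) (out : List (List Int)) : Prop := out = create_section_groups_alt sections session_type
instance (sections : List Int) (session_type : String) (out : List (List Int)) : Decidable (Spec_create_section_groups sections session_type out) := by unfold Spec_create_section_groups; infer_instance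

-- ===== CLAIM (what is proved, stated in full; the proofs are below) =====
def Claim_equal_create_section_groups : Prop := ∀ (sections : List Int) (session_type : String), Dom_create_section_groups sections session_type → Spec_create_section_groups sections session_type (create_section_groups sections session_type)

-- ===== LEMMAS AND PROOFS =====

-- canonical chunking both loops compute (proof-only helper)
def csgChunk (gs : Nat) : List Int → List (List Int)
  | [] => []
  | x :: xs => (x :: xs.take (gs - 1)) :: csgChunk gs (xs.drop (gs - 1))
termination_by l => l.length
decreasing_by simp

theorem csgChunk_nil (gs : Nat) : csgChunk gs [] = [] := by rw [csgChunk.eq_def]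

theorem csgChunk_cons_eq (gs : Nat) (x : Int) (xs : List Int) :
    csgChunk gs (x :: xs) = (x :: xs.take (gs - 1)) :: csgChunk gs (xs.drop (gs - 1)) := by
  rw [csgChunk.eq_def]

theorem csgChunk_cons (gs : Nat) (hgs : 1 ≤ gs) (l : List Int) (hl : l ≠ []) :
    csgChunk gs l = l.take gs :: csgChunk gs (l.drop gs) := by
  obtain ⟨m, rfl⟩ : ∃ m, gs = m + 1 := ⟨gs - 1, by omega⟩
  cases l with
  | nil => exact absurd rfl hl
  | cons x xs => simp [csgChunk_cons_eq]

theorem csgChunk_full (gs : Nat) (l rest : List Int) (hl : l ≠ []) (hlen : l.length = gs) :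
    csgChunk gs (l ++ rest) = l :: csgChunk gs rest := by
  cases l with
  | nil => exact absurd rfl hl
  | cons b bs =>
    have hbs : bs.length = gs - 1 := by simp at hlen; omega
    simp only [List.cons_append, csgChunk_cons_eq]
    rw [← hbs, List.take_left, List.drop_left]

theorem csgLoop_eq (gs : Nat) (hgs : 1 ≤ gs) :
    ∀ (xs : List Int) (groups : List (List Int)) (buf : List Int), buf.length < gs →
      csgLoop (gs : Int) groups buf xs = groups ++ csgChunk gs (buf ++ xs) := by
  intro xs
  induction xs with
  | nil =>
    intro groups buf hbuf
    cases buf with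
    | nil => simp [csgLoop, csgChunk_nil]
    | cons b bs =>
      have h1 : bs.take (gs - 1) = bs := List.take_of_length_le (by simp at hbuf; omega)
      have h2 : bs.drop (gs - 1) = [] := List.drop_eq_nil_of_le (by simp at hbuf; omega)
      simp [csgLoop, csgChunk_cons_eq, csgChunk_nil, h1, h2]
  | cons x xs ih =>
    intro groups buf hbuf
    by_cases h : buf.length + 1 = gs
    · have hc : (((buf ++ [x]).length : Int) = (gs : Int)) := by simp only [List.length_append, List.length_cons, List.length_nil]; push_cast; omega
      have hbuf' : (buf ++ [x]).length = gs := by simp only [List.length_append, List.length_cons, List.length_nil]; omega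
      simp only [csgLoop]
      rw [if_pos hc, ih (groups ++ [buf ++ [x]]) [] (by simp only [List.length_nil]; omega)]
      have : buf ++ x :: xs = (buf ++ [x]) ++ xs := by simp
      rw [this, csgChunk_full gs (buf ++ [x]) xs (by simp) hbuf']
      simp
    · have hc : ¬ (((buf ++ [x]).length : Int) = (gs : Int)) := by simp only [List.length_append, List.length_cons, List.length_nil]; push_cast; omega
      simp only [csgLoop]
      rw [if_neg hc, ih groups (buf ++ [x]) (by simp; omega)]
      simp

theorem pyRange_pos_nil (a b s : Int) (hs : 0 < s) (h : b ≤ a) :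
    PySem.List.pyRange a b s = [] := by
  rw [PySem.List.pyRange_of_pos a b hs, if_neg (by omega)]
  simp

theorem pyRange_pos_cons (a b s : Int) (hs : 0 < s) (hab : a < b) :
    PySem.List.pyRange a b s = a :: PySem.List.pyRange (a + s) b s := by
  rw [PySem.List.pyRange_of_pos a b hs, PySem.List.pyRange_of_pos (a + s) b hs,
    if_pos hab]
  have hnum : (b - a + s - 1) / s = (b - a - 1) / s + 1 := by
    have : b - a + s - 1 = (b - a - 1) + 1 * s := by ring
    rw [this, Int.add_mul_ediv_right _ _ (by omega)]
  have hq0 : 0 ≤ (b - a - 1) / s := Int.ediv_nonneg (by omega) (by omega)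
  by_cases h2 : a + s < b
  · rw [if_pos h2]
    have hnum2 : b - (a + s) + s - 1 = b - a - 1 := by ring
    rw [hnum2, hnum]
    have : ((b - a - 1) / s + 1).toNat = ((b - a - 1) / s).toNat + 1 := by omega
    rw [this, List.range_succ_eq_map, List.map_cons, List.map_map]
    congr 1
    · ring
    · apply List.map_congr_left
      intro k _
      simp [Function.comp]
      ring
  · rw [if_neg h2]
    have hq : (b - a - 1) / s = 0 := by
      rw [← PySem.Int.floordiv_eq_ediv_of_pos hs,
        PySem.Int.floordiv_eq_iff_of_pos hs]
      omega
    rw [hnum, hq]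
    simp

theorem csgFoldA (sections : List Int) (gs : Nat) (hgs : 1 ≤ gs) :
    ∀ (m i : Nat) (acc : List (List Int)), sections.length - i ≤ m →
      (PySem.List.pyRange (i : Int) (sections.length : Int) (gs : Int)).foldl
        (fun groups j => groups ++ [PySem.List.slice sections (some j) (some (j + (gs : Int)))]) acc
      = acc ++ csgChunk gs (sections.drop i) := by
  intro m
  induction m with
  | zero =>
    intro i acc hm
    rw [pyRange_pos_nil _ _ _ (by exact_mod_cast hgs) (by exact_mod_cast (by omega : sections.length ≤ i))]
    rw [List.drop_eq_nil_of_le (by omega)]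
    simp [csgChunk_nil]
  | succ m ih =>
    intro i acc hm
    by_cases hi : sections.length ≤ i
    · rw [pyRange_pos_nil _ _ _ (by exact_mod_cast hgs) (by exact_mod_cast hi)]
      rw [List.drop_eq_nil_of_le hi]
      simp [csgChunk_nil]
    · rw [Nat.not_le] at hi
      rw [pyRange_pos_cons _ _ _ (by exact_mod_cast hgs) (by exact_mod_cast hi)]
      simp only [List.foldl_cons]
      rw [PySem.List.slice_natCast_add]
      have hcast : ((i : Int) + (gs : Int)) = ((i + gs : Nat) : Int) := by push_cast; ring
      rw [hcast, ih (i + gs) _ (by omega)]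
      have hne : sections.drop i ≠ [] := by
        intro hnil
        have := List.length_drop (l := sections) (i := i)
        rw [hnil] at this
        simp at this; omega
      rw [csgChunk_cons gs hgs _ hne, List.drop_drop]
      simp

-- ===== VERDICT (by name: the statement is the Claim_ definition above) =====
theorem create_section_groups_spec : Claim_equal_create_section_groups := by
  intro sections session_type _
  unfold Spec_create_section_groups create_section_groups create_section_groups_alt
  set gsI : Int :=
    (if session_type = "TUT" then 1
     else if session_type = "Lab" then 2
     else if PySem.Int.mod (sections.length : Int) 2 = 0 then 4 else 3) with hgsI
  have hpos : 0 < gsI := by rw [hgsI]; split_ifs <;> norm_num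
  obtain ⟨gs, hgs⟩ : ∃ gs : Nat, gsI = (gs : Int) := ⟨gsI.toNat, by omega⟩
  have hgs1 : 1 ≤ gs := by omega
  rw [hgs]
  have hA := csgFoldA sections gs hgs1 sections.length 0 [] (by omega)
  have hB := csgLoop_eq gs hgs1 sections [] [] (by simp only [List.length_nil]; omega)
  simp only [Nat.cast_zero] at hA
  rw [hA, hB]
  simp
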